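-- pv_equiv track=rewrite | github.com/pppppplk/- | Лабораторная№8_Поликарпова/server.py | coding
-- ===== SOURCE A (Python) =====
-- def coding(st, key):
--     s = list(st)
--     for i in range(len(s)):
--         j = ord(s[i])  # ord - числовое представление символа
--         j += key
--         j = chr(j)  # chr - возвращает символ по его числовому значению
--         s[i] = j
--
--     return ''.join(s)
-- ===== SOURCE B (Python) =====
-- def coding(st, key):
--     # Divide and conquer: split the string in half, shift each half recursively,
--     # concatenate. Base cases: empty string, single character (chr(ord(c)+key)).
--     if len(st) == 0:
--         return ''
--     if len(st) == 1:
--         return chr(ord(st) + key)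
--     mid = len(st) // 2
--     return coding(st[:mid], key) + coding(st[mid:], key)
-- ===== Notes on version B (the rewrite author's own statement) =====
-- stated objective: alternative
-- what changed: Replaces A's linear index loop mutating a char list with a divide-and-conquer recursion that splits the string in half, shifts each half recursively, and concatenates, with chr(ord(c)+key) only at the single-character base case.
import Mathlib
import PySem

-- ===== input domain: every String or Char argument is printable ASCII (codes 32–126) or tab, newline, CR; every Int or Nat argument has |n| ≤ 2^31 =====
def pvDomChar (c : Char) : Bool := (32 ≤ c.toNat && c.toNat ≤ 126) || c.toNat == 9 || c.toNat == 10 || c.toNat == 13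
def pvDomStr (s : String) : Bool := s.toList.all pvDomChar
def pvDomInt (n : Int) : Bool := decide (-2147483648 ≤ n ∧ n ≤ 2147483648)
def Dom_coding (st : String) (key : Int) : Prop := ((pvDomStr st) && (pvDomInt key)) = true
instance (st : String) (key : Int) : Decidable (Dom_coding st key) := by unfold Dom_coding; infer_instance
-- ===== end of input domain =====

-- B replaces A's linear index loop mutating a char list with a divide-and-conquer
-- recursion splitting the string in half (alternative decomposition; same return value).

-- chr(j): exact for j a valid Unicode scalar value, which Pre_coding guarantees
def pychr (j : Int) : Char := Char.ofNat j.toNat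

-- ===== PORT A =====
def coding (st : String) (key : Int) : String :=
  let s := st.toList
  let s := (PySem.List.pyRange 0 (s.length : Int) 1).foldl
    (fun s i =>
      PySem.List.pySetD s i (pychr (((PySem.List.pyGetD s i 'A').toNat : Int) + key))) s
  String.mk s

-- ===== PORT B =====
-- recursion over the char list; st[:mid] / st[mid:] are exact as take/drop since
-- 0 ≤ mid ≤ len; ord(st) on the 1-char string is the ord of its only character
def codingAltRec (key : Int) (l : List Char) : List Char :=
  if l.length = 0 then []
  else if l.length = 1 then [pychr (((l.headD 'A').toNat : Int) + key)]
  else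
    let mid := l.length / 2
    codingAltRec key (l.take mid) ++ codingAltRec key (l.drop mid)
termination_by l.length
decreasing_by
  · simp only [List.length_take]; omega
  · simp only [List.length_drop]; omega

def coding_alt (st : String) (key : Int) : String :=
  String.mk (codingAltRec key st.toList)

-- ===== PRECONDITION & SPEC =====
-- Pre_ excludes inputs where chr raises ValueError (shifted code point out of range) and
-- the narrow band where the shifted code point is a lone surrogate: Python returns a
-- surrogate str there, which is not a value of the Lean String type.
def pvCodeOk (key : Int) (c : Char) : Bool :=
  (decide (0 ≤ (c.toNat : Int) + key) && decide ((c.toNat : Int) + key < 55296)) ||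
  (decide (57343 < (c.toNat : Int) + key) && decide ((c.toNat : Int) + key ≤ 1114111))
def Pre_coding (st : String) (key : Int) : Prop :=
  st.toList.all (pvCodeOk key) = true
instance (st : String) (key : Int) : Decidable (Pre_coding st key) := by
  unfold Pre_coding; infer_instance

def pvWitness_coding : String × Int := ("abc", 3)

def Spec_coding (st : String) (key : Int) (out : String) : Prop := out = coding_alt st key
instance (st : String) (key : Int) (out : String) : Decidable (Spec_coding st key out) := by
  unfold Spec_coding; infer_instance

-- ===== CLAIM (what is proved, stated in full; the proofs are below) =====
def Claim_equal_coding : Prop :=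
  ∀ (st : String) (key : Int), Dom_coding st key → Pre_coding st key →
    Spec_coding st key (coding st key)

-- ===== LEMMAS AND PROOFS =====

-- A's index loop 'for i: s[i] = f(s[i])' is a map, by induction on the tail with the done prefix generalized
theorem foldl_set_map (f : Char → Char) :
    ∀ (t a : List Char),
      (PySem.List.pyRange (a.length : Int) ((a.length : Int) + (t.length : Int)) 1).foldl
        (fun s i => PySem.List.pySetD s i (f (PySem.List.pyGetD s i 'A'))) (a ++ t)
      = a ++ t.map f := by
  intro t
  induction t with
  | nil =>
      intro a
      rw [PySem.List.pyRange_one_eq_nil (by simp)]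
      simp
  | cons c t ih =>
      intro a
      rw [PySem.List.pyRange_one_cons (by simp only [List.length_cons]; push_cast; omega)]
      simp only [List.foldl_cons]
      have hget : PySem.List.pyGetD (a ++ c :: t) (a.length : Int) 'A' = c := by
        rw [PySem.List.pyGetD_natCast]
        simp [List.getD]
      have hset : PySem.List.pySetD (a ++ c :: t) (a.length : Int) (f c)
          = (a ++ [f c]) ++ t := by
        rw [PySem.List.pySetD_natCast]
        rw [List.set_append_right a.length (f c) le_rfl]
        simp
      rw [hget, hset]
      have h2 : ((a.length : Int) + 1) = (((a ++ [f c]).length : Int)) := by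
        simp
      have h3 : ((a.length : Int) + ((c :: t).length : Int))
          = (((a ++ [f c]).length : Int) + (t.length : Int)) := by
        simp
        omega
      rw [h2, h3, ih (a ++ [f c])]
      simp

theorem coding_eq_map (st : String) (key : Int) :
    coding st key = String.mk (st.toList.map (fun c => pychr ((c.toNat : Int) + key))) := by
  unfold coding
  have := foldl_set_map (fun c => pychr ((c.toNat : Int) + key)) st.toList []
  simp only [List.length_nil, Nat.cast_zero, List.nil_append, zero_add] at this
  simp only []
  rw [this]

-- B's divide-and-conquer is the same map, by induction following its own recursion
theorem codingAltRec_eq_map (key : Int) (l : List Char) :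
    codingAltRec key l = l.map (fun c => pychr ((c.toNat : Int) + key)) := by
  rw [codingAltRec]
  split_ifs with h0 h1
  · rw [List.length_eq_zero_iff.mp h0]; rfl
  · obtain ⟨c, rfl⟩ := List.length_eq_one_iff.mp h1
    rfl
  · show codingAltRec key (l.take (l.length / 2)) ++ codingAltRec key (l.drop (l.length / 2))
        = l.map (fun c => pychr ((c.toNat : Int) + key))
    rw [codingAltRec_eq_map key (l.take (l.length / 2)),
        codingAltRec_eq_map key (l.drop (l.length / 2)),
        ← List.map_append, List.take_append_drop]
termination_by l.length
decreasing_by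
  · simp only [List.length_take]; omega
  · simp only [List.length_drop]; omega

-- ===== VERDICT (by name: the statement is the Claim_ definition above) =====
theorem coding_spec : Claim_equal_coding := by
  intro st key _ _
  unfold Spec_coding
  rw [coding_eq_map]
  unfold coding_alt
  rw [codingAltRec_eq_map]
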